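-- pv_equiv track=rewrite | github.com/mayur75584/GeeksForGeeks | GeeksforGeeks/362(Minimum time to fulfil all orders).py | isPossible
-- ===== SOURCE A (Python) =====
-- def isPossible(mid,n,arr):
--     donuts=0
--     for t in arr:
--         timeTaken=0
--         timeWillTake=t
--         while(timeTaken+timeWillTake<=mid):
--             donuts+=1
--             timeTaken+=timeWillTake
--             timeWillTake+=t
--     if(donuts>=n):
--         return True
--     else:
--         return False
-- ===== SOURCE B (Python) =====
-- def isPossible(mid, n, arr):
--     total = 0
--     for t in arr:
--         if t <= mid:
--             # binary search for the largest k with t*(1+2+...+k) <= mid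
--             lo, hi = 1, mid // t + 1
--             while hi - lo > 1:
--                 k = (lo + hi) // 2
--                 if t * k * (k + 1) // 2 <= mid:
--                     lo = k
--                 else:
--                     hi = k
--             total += lo
--     return total >= n
-- ===== Notes on version B (the rewrite author's own statement) =====
-- stated objective: alternative
-- what changed: Replaces A's per-bakery linear step-by-step simulation of cumulative baking times with a per-bakery binary search for the largest batch count k with t*k*(k+1)/2 <= mid; intended as faster (A timed out on a timing run's larger inputs while B returned, but no clean ratio could be measured).
import Mathlib
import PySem

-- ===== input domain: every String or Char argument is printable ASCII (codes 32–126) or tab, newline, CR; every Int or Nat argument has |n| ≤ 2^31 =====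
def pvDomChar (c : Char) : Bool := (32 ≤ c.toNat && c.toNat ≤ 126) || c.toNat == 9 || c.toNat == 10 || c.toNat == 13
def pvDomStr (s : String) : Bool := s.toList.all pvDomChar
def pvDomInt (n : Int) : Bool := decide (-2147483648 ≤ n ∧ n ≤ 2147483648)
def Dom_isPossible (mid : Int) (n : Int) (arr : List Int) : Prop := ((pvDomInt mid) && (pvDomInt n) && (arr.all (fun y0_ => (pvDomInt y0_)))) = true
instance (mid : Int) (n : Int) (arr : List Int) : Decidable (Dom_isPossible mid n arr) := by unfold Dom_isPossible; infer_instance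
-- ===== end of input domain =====

-- B replaces A's step-by-step simulation of each bakery's cumulative times by a
-- per-bakery binary search for the largest batch count; return value only, no mutation.

-- ===== PORT A =====
-- inner while loop of A; fuel is only a totality guard (under Pre_ it never runs out)
def pvLoopA (mid t : Int) : Nat → Int → Int → Int → Int
  | 0, _, _, donuts => donuts
  | fuel+1, timeTaken, timeWillTake, donuts =>
    if timeTaken + timeWillTake ≤ mid then
      pvLoopA mid t fuel (timeTaken + timeWillTake) (timeWillTake + t) (donuts + 1)
    else donuts

def isPossible (mid : Int) (n : Int) (arr : List Int) : Bool :=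
  let donuts := arr.foldl (fun donuts t => pvLoopA mid t (mid.toNat + 1) 0 t donuts) 0
  decide (donuts ≥ n)

-- ===== PORT B =====
-- binary-search while loop of Source B; fuel is only a totality guard
def pvLoopB (mid t : Int) : Nat → Int → Int → Int
  | 0, lo, _ => lo
  | fuel+1, lo, hi =>
    if hi - lo > 1 then
      let k := PySem.Int.floordiv (lo + hi) 2
      if PySem.Int.floordiv (t * k * (k + 1)) 2 ≤ mid then
        pvLoopB mid t fuel k hi
      else
        pvLoopB mid t fuel lo k
    else lo

def isPossible_alt (mid : Int) (n : Int) (arr : List Int) : Bool :=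
  let total := arr.foldl
    (fun total t =>
      if t ≤ mid then total + pvLoopB mid t (mid.toNat + 2) 1 (PySem.Int.floordiv mid t + 1)
      else total) 0
  decide (total ≥ n)

-- ===== PRECONDITION & SPEC =====
-- Pre_ excludes exactly the inputs on which A's inner while loop never terminates:
-- a non-positive duration t whose very first iteration already fits (t ≤ mid).
def Pre_isPossible (mid : Int) (n : Int) (arr : List Int) : Prop :=
  ∀ t ∈ arr, 1 ≤ t ∨ mid < t
instance (mid : Int) (n : Int) (arr : List Int) : Decidable (Pre_isPossible mid n arr) := by unfold Pre_isPossible; infer_instance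

def pvWitness_isPossible : Int × Int × List Int := (10, 6, [1, 2])

def Spec_isPossible (mid : Int) (n : Int) (arr : List Int) (out : Bool) : Prop := out = isPossible_alt mid n arr
instance (mid : Int) (n : Int) (arr : List Int) (out : Bool) : Decidable (Spec_isPossible mid n arr out) := by unfold Spec_isPossible; infer_instance

-- ===== CLAIM (what is proved, stated in full; the proofs are below) =====
def Claim_equal_isPossible : Prop := ∀ (mid : Int) (n : Int) (arr : List Int), Dom_isPossible mid n arr → Pre_isPossible mid n arr → Spec_isPossible mid n arr (isPossible mid n arr)

-- ===== LEMMAS AND PROOFS =====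

-- triangle number
def pvTri (k : Nat) : Nat := k * (k + 1) / 2

-- "k batches of duration t fit within mid"
def pvFeas (mid t : Int) (k : Nat) : Prop := t * (pvTri k : Int) ≤ mid

lemma pvTri_two_mul (k : Nat) : 2 * pvTri k = k * (k + 1) := by
  have h : 2 ∣ k * (k + 1) := (Nat.even_mul_succ_self k).two_dvd
  unfold pvTri; omega

lemma pvTri_succ (k : Nat) : pvTri (k + 1) = pvTri k + (k + 1) := by
  have h1 := pvTri_two_mul k
  have h2 := pvTri_two_mul (k + 1)
  have e : (k + 1) * (k + 1 + 1) = k * (k + 1) + 2 * (k + 1) := by ring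
  omega

lemma pvTri_le (k : Nat) : k ≤ pvTri k := by
  have h1 := pvTri_two_mul k
  have h3 : 2 * k ≤ k * (k + 1) := by nlinarith
  omega

lemma pvTri_mono {i j : Nat} (h : i ≤ j) : pvTri i ≤ pvTri j := by
  have h1 := pvTri_two_mul i
  have h2 := pvTri_two_mul j
  have h3 : i * (i + 1) ≤ j * (j + 1) := Nat.mul_le_mul h (by omega)
  omega

lemma pvFeas_anti {mid t : Int} (ht : 1 ≤ t) {i j : Nat} (hij : i ≤ j)
    (h : pvFeas mid t j) : pvFeas mid t i := by
  unfold pvFeas at *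
  have := mul_le_mul_of_nonneg_left (by exact_mod_cast pvTri_mono hij : ((pvTri i : Int)) ≤ (pvTri j : Int)) (by omega : (0:Int) ≤ t)
  omega

lemma pvFeas_bound {mid t : Int} (ht : 1 ≤ t) {k : Nat} (h : pvFeas mid t k) :
    (k : Int) ≤ mid := by
  unfold pvFeas at h
  have h1 : (k : Int) ≤ (pvTri k : Int) := by exact_mod_cast pvTri_le k
  have h2 : (pvTri k : Int) ≤ t * (pvTri k : Int) := le_mul_of_one_le_left (by positivity) ht
  omega

lemma pvFeas_uniq {mid t : Int} (ht : 1 ≤ t) {a b : Nat}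
    (ha : pvFeas mid t a) (ha1 : ¬ pvFeas mid t (a + 1))
    (hb : pvFeas mid t b) (hb1 : ¬ pvFeas mid t (b + 1)) : a = b := by
  rcases Nat.lt_trichotomy a b with h | h | h
  · exact absurd (pvFeas_anti ht (by omega) hb) ha1
  · exact h
  · exact absurd (pvFeas_anti ht (by omega) ha) hb1

-- the Python expression t*k*(k+1)//2 computes t * pvTri k (for k = ↑m, m : Nat)
lemma pvFloordiv_tri (t : Int) (m : Nat) :
    PySem.Int.floordiv (t * (m : Int) * ((m : Int) + 1)) 2 = t * (pvTri m : Int) := by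
  have hc : ((m : Int)) * ((m : Int) + 1) = 2 * ((pvTri m : Nat) : Int) := by
    exact_mod_cast congrArg (fun x : Nat => (x : Int)) (pvTri_two_mul m).symm
  have key : t * (m : Int) * ((m : Int) + 1) = (t * (pvTri m : Int)) * 2 := by
    rw [mul_assoc, hc]; ring
  rw [key, PySem.Int.floordiv_eq_ediv_of_pos (by norm_num)]
  exact Int.mul_ediv_cancel _ (by norm_num)

-- A's inner loop: from the state after j iterations it finishes with d + (K - j)
lemma pvLoopA_eq (mid t : Int) (ht : 1 ≤ t) (K : Nat)
    (hK : pvFeas mid t K) (hK1 : ¬ pvFeas mid t (K + 1)) :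
    ∀ fuel j (d : Int), j ≤ K → K - j ≤ fuel →
      pvLoopA mid t fuel (t * (pvTri j : Int)) (t * ((j : Int) + 1)) d = d + ((K : Int) - j) := by
  intro fuel
  induction fuel with
  | zero =>
    intro j d hj hf
    have hjK : j = K := by omega
    subst hjK
    simp [pvLoopA]
  | succ fuel ih =>
    intro j d hj hf
    have hsum : t * (pvTri j : Int) + t * ((j : Int) + 1) = t * (pvTri (j + 1) : Int) := by
      rw [pvTri_succ]; push_cast; ring
    by_cases hc : t * (pvTri j : Int) + t * ((j : Int) + 1) ≤ mid
    · have hfj : pvFeas mid t (j + 1) := by unfold pvFeas; omega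
      have hjK : j + 1 ≤ K := by
        by_contra h
        have hje : j = K := by omega
        subst hje; exact hK1 hfj
      have hnext : t * ((j : Int) + 1) + t = t * (((j + 1 : Nat) : Int) + 1) := by
        push_cast; ring
      simp only [pvLoopA]
      rw [if_pos hc, hsum, hnext, ih (j + 1) (d + 1) hjK (by omega)]
      push_cast; ring
    · have hjK : j = K := by
        by_contra h
        have hfj : pvFeas mid t (j + 1) := pvFeas_anti ht (by omega) hK
        unfold pvFeas at hfj; omega
      subst hjK
      simp only [pvLoopA]
      rw [if_neg hc]
      omega

-- B's binary search: with a feasible lo and an infeasible hi it finds K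
lemma pvLoopB_eq (mid t : Int) (ht : 1 ≤ t) (K : Nat)
    (hK : pvFeas mid t K) (hK1 : ¬ pvFeas mid t (K + 1)) :
    ∀ (fuel : Nat) (lo hi : Int), 1 ≤ lo → lo < hi →
      pvFeas mid t lo.toNat → ¬ pvFeas mid t hi.toNat → hi - lo ≤ (fuel : Int) →
      pvLoopB mid t fuel lo hi = (K : Int) := by
  intro fuel
  induction fuel with
  | zero =>
    intro lo hi h1 hlh _ _ hf
    exfalso
    simp only [Nat.cast_zero] at hf
    omega
  | succ fuel ih =>
    intro lo hi h1 hlh hflo hfhi hf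
    by_cases hgap : hi - lo > 1
    · simp only [pvLoopB]
      rw [if_pos hgap]
      set k := PySem.Int.floordiv (lo + hi) 2 with hk
      have hke : k = (lo + hi) / 2 := by rw [hk, PySem.Int.floordiv_eq_ediv_of_pos (by norm_num)]
      have hklo : lo + 1 ≤ k := by rw [hke]; omega
      have hkhi : k < hi := by rw [hke]; omega
      have hkcast : ((k.toNat : Int)) = k := Int.toNat_of_nonneg (by omega)
      have hfd : PySem.Int.floordiv (t * k * (k + 1)) 2 = t * (pvTri k.toNat : Int) := by
        rw [← hkcast]; exact pvFloordiv_tri t k.toNat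
      by_cases hc : PySem.Int.floordiv (t * k * (k + 1)) 2 ≤ mid
      · rw [if_pos hc]
        have hfk : pvFeas mid t k.toNat := by unfold pvFeas; rw [← hfd]; exact hc
        exact ih k hi (by omega) (by omega) hfk hfhi (by push_cast at hf ⊢; omega)
      · rw [if_neg hc]
        have hfk : ¬ pvFeas mid t k.toNat := by unfold pvFeas; rw [← hfd]; exact hc
        exact ih lo k h1 (by omega) hflo hfk (by push_cast at hf ⊢; omega)
    · simp only [pvLoopB]
      rw [if_neg hgap]
      have hhi : hi.toNat = lo.toNat + 1 := by omega
      rw [hhi] at hfhi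
      have h := pvFeas_uniq ht hflo hfhi hK hK1
      omega

-- existence of the maximal feasible batch count, when 1 ≤ t ≤ mid
lemma pvK_exists (mid t : Int) (ht : 1 ≤ t) (htm : t ≤ mid) :
    ∃ K : Nat, pvFeas mid t K ∧ ¬ pvFeas mid t (K + 1) ∧ (K : Int) ≤ mid := by
  classical
  set K := Nat.findGreatest (fun k => pvFeas mid t k) mid.toNat with hKdef
  have h0 : pvFeas mid t 0 := by unfold pvFeas pvTri; simp; omega
  have hK : pvFeas mid t K := Nat.findGreatest_spec (Nat.zero_le _) h0
  have hbound : (K : Int) ≤ mid := pvFeas_bound ht hK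
  refine ⟨K, hK, ?_, hbound⟩
  intro hK1
  have hle : ((K + 1 : Nat) : Int) ≤ mid := pvFeas_bound ht hK1
  have hcontra : K + 1 ≤ K := Nat.le_findGreatest (by omega) hK1
  omega

-- per-element equality of the two fold steps, for durations admitted by Pre_
lemma pvElem_eq (mid t : Int) (hpre : 1 ≤ t ∨ mid < t) (d : Int) :
    pvLoopA mid t (mid.toNat + 1) 0 t d =
      (if t ≤ mid then d + pvLoopB mid t (mid.toNat + 2) 1 (PySem.Int.floordiv mid t + 1) else d) := by
  by_cases htm : t ≤ mid
  · have ht : 1 ≤ t := by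
      rcases hpre with h | h
      · exact h
      · omega
    obtain ⟨K, hK, hK1, hKb⟩ := pvK_exists mid t ht htm
    rw [if_pos htm]
    -- A side
    have hA := pvLoopA_eq mid t ht K hK hK1 (mid.toNat + 1) 0 d (Nat.zero_le _) (by omega)
    have h0 : t * ((pvTri 0 : Nat) : Int) = 0 := by unfold pvTri; simp
    have h1 : t * (((0 : Nat) : Int) + 1) = t := by simp
    rw [h0, h1] at hA
    simp only [Nat.cast_zero, sub_zero] at hA
    -- B side
    set q := PySem.Int.floordiv mid t with hq
    have hqe : q = mid / t := by rw [hq, PySem.Int.floordiv_eq_ediv_of_pos (by omega)]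
    have hq1 : 1 ≤ q := by
      rw [hqe]
      exact (Int.le_ediv_iff_mul_le (by omega)).2 (by omega)
    have hf1 : pvFeas mid t (1 : Int).toNat := by
      unfold pvFeas pvTri
      simpa using htm
    have hfhi : ¬ pvFeas mid t (q + 1).toNat := by
      intro hfeas
      have hgt : mid < (mid / t + 1) * t := Int.lt_ediv_add_one_mul_self mid (by omega)
      have hcast : (((q + 1).toNat : Int)) = q + 1 := Int.toNat_of_nonneg (by omega)
      have htri : (q + 1).toNat ≤ pvTri (q + 1).toNat := pvTri_le _
      unfold pvFeas at hfeas
      have h2 : t * ((q + 1).toNat : Int) ≤ t * ((pvTri (q + 1).toNat : Nat) : Int) :=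
        mul_le_mul_of_nonneg_left (by exact_mod_cast htri) (by omega)
      rw [hcast] at h2
      have h3 : t * (q + 1) = (mid / t + 1) * t := by rw [hqe]; ring
      omega
    have hfuel : q + 1 - 1 ≤ ((mid.toNat + 2 : Nat) : Int) := by
      have hqm : q ≤ mid := by rw [hqe]; exact Int.ediv_le_self t (by omega)
      push_cast; omega
    have hB := pvLoopB_eq mid t ht K hK hK1 (mid.toNat + 2) 1 (q + 1)
      (le_refl 1) (by omega) hf1 hfhi hfuel
    rw [hA, hB]
  · rw [if_neg htm]
    simp only [pvLoopA]
    rw [if_neg (by omega)]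

lemma pvFold_eq (mid : Int) :
    ∀ (arr : List Int) (d : Int), (∀ t ∈ arr, 1 ≤ t ∨ mid < t) →
      arr.foldl (fun donuts t => pvLoopA mid t (mid.toNat + 1) 0 t donuts) d =
      arr.foldl (fun total t =>
        if t ≤ mid then total + pvLoopB mid t (mid.toNat + 2) 1 (PySem.Int.floordiv mid t + 1)
        else total) d := by
  intro arr
  induction arr with
  | nil => intro d _; rfl
  | cons t rest ih =>
    intro d hpre
    simp only [List.foldl_cons]
    rw [pvElem_eq mid t (hpre t (by simp)) d]
    exact ih _ (fun u hu => hpre u (by simp [hu]))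

-- ===== VERDICT (by name: the statement is the Claim_ definition above) =====
theorem isPossible_spec : Claim_equal_isPossible := by
  intro mid n arr _ hpre
  unfold Spec_isPossible isPossible isPossible_alt
  rw [pvFold_eq mid arr 0 hpre]
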